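-- pv_equiv track=rewrite | github.com/beyondthemist/Problem-solving-solution | Programmers/lv.2/87946/solution.py | solution
-- ===== SOURCE A (Python) =====
-- from typing import Set
--
-- def solution(k, dungeons):
--     n = len(dungeons)
--
--     def discover(curr_hp=k, discovered_stage=0, discovered: Set[int]=set()) -> int:
--         # if all dungeons are discovered
--         if discovered_stage >= n:
--             return n
--
--         # Look out dungeon to discover
--         to_discover = list()
--         for i in range(n):
--             if curr_hp >= dungeons[i][0] \
--                 and i not in discovered:
--                 to_discover.append(i)
--
--         # if there is no dungeon to discover
--         if not to_discover:
--             return discovered_stage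
--
--
--         # if there is dungeon to discover
--         res = -1
--         for dest_idx in to_discover:
--             x = discover(
--                 curr_hp=curr_hp - dungeons[dest_idx][1],
--                 discovered_stage=discovered_stage + 1,
--                 discovered=discovered.union(set([dest_idx]))
--             )
--
--             if res < x:
--                 res = x
--
--         return res
--
--     return discover()
-- ===== SOURCE B (Python) =====
-- def solution(k, dungeons):
--     # Bitmask DP over subsets: a mask is reachable iff some dungeon in it can be
--     # entered last; answer = max popcount over reachable masks.
--     n = len(dungeons)
--     need = [d[0] for d in dungeons]
--     cost = [d[1] for d in dungeons]
--     reach = [True]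
--     best = 0
--     for mask in range(1, 1 << n):
--         s = 0
--         for i in range(n):
--             if mask >> i & 1:
--                 s += cost[i]
--         ok = any(mask >> i & 1
--                  and reach[mask ^ (1 << i)]
--                  and k - (s - cost[i]) >= need[i]
--                  for i in range(n))
--         reach.append(ok)
--         if ok:
--             pc = mask.bit_count()
--             if pc > best:
--                 best = pc
--     return best
-- ===== Notes on version B (the rewrite author's own statement) =====
-- stated objective: alternative
-- what changed: A explores every discovery order by recursion on a 'discovered' set; B instead does a bottom-up bitmask DP over subsets of dungeons (hp spent is order-independent), marking each subset reachable iff some member can be cleared last, and returns the max popcount of a reachable subset; B enumerates all 2^n subsets, so it wins when many orders are feasible but loses to A's dead-end pruning on large inputs.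
-- outside the precondition, e.g. on solution(0, [[5]]): A returns 0, B raises IndexError
import Mathlib
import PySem

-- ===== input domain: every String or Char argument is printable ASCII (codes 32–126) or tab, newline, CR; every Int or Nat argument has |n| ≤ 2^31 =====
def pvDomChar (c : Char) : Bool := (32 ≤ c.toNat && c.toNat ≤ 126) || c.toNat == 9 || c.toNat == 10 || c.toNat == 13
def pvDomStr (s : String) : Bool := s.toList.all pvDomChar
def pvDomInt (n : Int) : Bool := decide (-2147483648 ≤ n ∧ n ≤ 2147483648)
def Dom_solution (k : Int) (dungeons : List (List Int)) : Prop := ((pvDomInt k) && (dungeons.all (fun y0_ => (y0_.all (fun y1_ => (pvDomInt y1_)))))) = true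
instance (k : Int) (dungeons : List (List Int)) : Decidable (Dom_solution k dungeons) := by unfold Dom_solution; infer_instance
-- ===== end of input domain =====

-- B replaces A's DFS over discovery orderings (recursion on a 'discovered' set) by a
-- bottom-up bitmask DP over subsets of dungeons; objective: alternative algorithm.

-- ===== PORT A =====
-- A's inner 'discover'; fuel = n - discovered_stage along every real call (the fuel-0 arm is unreachable
-- from 'solution' because 'discovered_stage >= n' returns first).
def discover (k : Int) (dungeons : List (List Int)) (n : Nat) :
    Nat → Int → Int → PySem.Set Int → Int
  | fuel, currHp, stage, disc =>
    if stage ≥ (n : Int) then (n : Int)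
    else
      -- for i in range(n): if curr_hp >= dungeons[i][0] and i not in discovered: to_discover.append(i)
      let toDiscover := (List.range n).foldl (fun (acc : List Nat) (i : Nat) =>
        if currHp ≥ ((PySem.List.pyGet? ((PySem.List.pyGet? dungeons (i : Int)).getD []) 0).getD 0)
            ∧ ¬ (PySem.Set.contains disc (i : Int) = true) then acc ++ [i] else acc) []
      if toDiscover = [] then stage
      else
        match fuel with
        | 0 => -1
        | fuel' + 1 =>
          toDiscover.foldl (fun (res : Int) (i : Nat) =>
            let x := discover k dungeons n fuel'
              (currHp - ((PySem.List.pyGet? ((PySem.List.pyGet? dungeons (i : Int)).getD []) 1).getD 0))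
              (stage + 1)
              (PySem.Set.union disc (PySem.Set.ofList [(i : Int)]))
            if res < x then x else res) (-1)

def solution (k : Int) (dungeons : List (List Int)) : Int :=
  discover k dungeons dungeons.length dungeons.length k 0 PySem.Set.empty

-- ===== PORT B =====
-- loop body of B's 'for mask in range(1, 1 << n)': st = (reach list so far, best)
def altStep (k : Int) (n : Nat) (need cost : List Int)
    (st : List Bool × Int) (mask : Nat) : List Bool × Int :=
  let s := (List.range n).foldl (fun acc i =>
    if (mask >>> i) &&& 1 == 1 then acc + cost.getD i 0 else acc) 0
  let ok := (List.range n).any (fun i =>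
    ((mask >>> i) &&& 1 == 1) && st.1.getD (mask ^^^ (1 <<< i)) false
      && decide (k - (s - cost.getD i 0) ≥ need.getD i 0))
  (st.1 ++ [ok],
   if ok && decide ((PySem.Int.bitCount (mask : Int) : Int) > st.2)
   then (PySem.Int.bitCount (mask : Int) : Int) else st.2)

def solution_alt (k : Int) (dungeons : List (List Int)) : Int :=
  let n := dungeons.length
  let need := dungeons.map (fun d => (PySem.List.pyGet? d 0).getD 0)
  let cost := dungeons.map (fun d => (PySem.List.pyGet? d 1).getD 0)
  (((List.range (2 ^ n)).drop 1).foldl (altStep k n need cost) ([true], 0)).2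

-- ===== PRECONDITION & SPEC =====
-- Pre_ excludes inner lists with fewer than two entries: A raises IndexError on them whenever it
-- reads dungeons[i][0] or enters dungeon i (it still returns on some, e.g. a length-1 dungeon it
-- can never enter), and B's eager need/cost extraction raises IndexError on all of them.
def Pre_solution (k : Int) (dungeons : List (List Int)) : Prop :=
  ∀ d ∈ dungeons, 2 ≤ d.length
instance (k : Int) (dungeons : List (List Int)) : Decidable (Pre_solution k dungeons) := by
  unfold Pre_solution; infer_instance

def pvWitness_solution : Int × List (List Int) := (10, [[5, 3], [2, 2]])

def Spec_solution (k : Int) (dungeons : List (List Int)) (out : Int) : Prop := out = solution_alt k dungeons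
instance (k : Int) (dungeons : List (List Int)) (out : Int) : Decidable (Spec_solution k dungeons out) := by unfold Spec_solution; infer_instance

-- ===== CLAIM (what is proved, stated in full; the proofs are below) =====
def Claim_equal_solution : Prop := ∀ (k : Int) (dungeons : List (List Int)), Dom_solution k dungeons → Pre_solution k dungeons → Spec_solution k dungeons (solution k dungeons)

-- ===== LEMMAS AND PROOFS =====

def needF (dungeons : List (List Int)) (i : Nat) : Int :=
  (PySem.List.pyGet? ((PySem.List.pyGet? dungeons (i : Int)).getD []) 0).getD 0
def costF (dungeons : List (List Int)) (i : Nat) : Int :=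
  (PySem.List.pyGet? ((PySem.List.pyGet? dungeons (i : Int)).getD []) 1).getD 0
def spentF (dungeons : List (List Int)) (m : Nat) : Int :=
  ∑ i ∈ Finset.range dungeons.length, if m.testBit i then costF dungeons i else 0
def pcN (m : Nat) : Nat := PySem.Int.bitCount (m : Int)

-- m is an achievable set of cleared dungeons
inductive Reach (k : Int) (dungeons : List (List Int)) : Nat → Prop
  | zero : Reach k dungeons 0
  | step (m i : Nat) : i < dungeons.length → m.testBit i = false →
      Reach k dungeons m → k - spentF dungeons m ≥ needF dungeons i →
      Reach k dungeons (m ||| 2 ^ i)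

theorem bitget_eq_testBit (m i : Nat) : ((m >>> i) &&& 1 == 1) = m.testBit i := by
  rw [Nat.and_one_is_mod, Nat.shiftRight_eq_div_pow, Nat.testBit_eq_decide_div_mod_eq]
  by_cases h : m / 2 ^ i % 2 = 1 <;> simp [h]

theorem or_div_two (a b : Nat) : (a ||| b) / 2 = a / 2 ||| b / 2 := by
  apply Nat.eq_of_testBit_eq; intro j
  simp [Nat.testBit_div_two, Nat.testBit_or]

theorem or_mod_two_even (a b : Nat) (hb : b % 2 = 0) : (a ||| b) % 2 = a % 2 := by
  have h2 := Nat.testBit_or a b 0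
  rw [Nat.testBit_zero, Nat.testBit_zero, Nat.testBit_zero] at h2
  rcases Nat.mod_two_eq_zero_or_one (a ||| b) with h | h <;>
    rcases Nat.mod_two_eq_zero_or_one a with h' | h' <;> simp [h, h', hb] at h2 ⊢

theorem pcN_zero : pcN 0 = 0 := by decide

theorem pcN_halve (m : Nat) : pcN m = m % 2 + pcN (m / 2) := by
  rcases Nat.eq_zero_or_pos m with h | h
  · subst h; decide
  · exact PySem.Int.bitCount_natCast h

theorem pcN_le (n : Nat) : ∀ m, m < 2 ^ n → pcN m ≤ n := by
  induction n with
  | zero => intro m hm; interval_cases m; decide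
  | succ n ih =>
    intro m hm
    rw [pcN_halve]
    have := ih (m / 2) (by omega)
    omega

theorem pcN_or (i : Nat) : ∀ m, m.testBit i = false → pcN (m ||| 2 ^ i) = pcN m + 1 := by
  induction i with
  | zero =>
    intro m h
    have hm2 : m % 2 = 0 := by
      rw [Nat.testBit_zero] at h; simpa using h
    rw [pow_zero, pcN_halve (m ||| 1), or_div_two, pcN_halve m]
    have h1 : (1 : Nat) / 2 = 0 := by norm_num
    rw [h1, Nat.or_zero]
    have hmod : (m ||| 1) % 2 = 1 := by
      have h2 := Nat.testBit_or m 1 0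
      rw [Nat.testBit_zero, Nat.testBit_zero, Nat.testBit_zero] at h2
      rcases Nat.mod_two_eq_zero_or_one (m ||| 1) with h3 | h3 <;> simp [h3, hm2] at h2 ⊢
    omega
  | succ i ih =>
    intro m h
    have hb : (m / 2).testBit i = false := by rw [Nat.testBit_div_two]; exact h
    rw [pcN_halve (m ||| 2 ^ (i+1)), or_div_two, or_mod_two_even _ _ (by simp [Nat.pow_succ]),
      show (2:Nat) ^ (i+1) / 2 = 2 ^ i by omega, ih _ hb, pcN_halve m]
    omega

theorem testBit_or_two_pow (m i j : Nat) :
    (m ||| 2 ^ i).testBit j = (m.testBit j || decide (i = j)) := by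
  simp [Nat.testBit_or, Nat.testBit_two_pow]

theorem or_xor_cancel (m i : Nat) (h : m.testBit i = false) : (m ||| 2 ^ i) ^^^ 2 ^ i = m := by
  apply Nat.eq_of_testBit_eq; intro j
  rw [Nat.testBit_xor, testBit_or_two_pow, Nat.testBit_two_pow]
  by_cases hj : i = j
  · subst hj; simp [h]
  · simp [hj]

theorem xor_two_pow_facts (m i : Nat) (h : m.testBit i = true) :
    (m ^^^ 2 ^ i).testBit i = false ∧ (m ^^^ 2 ^ i) ||| 2 ^ i = m ∧ m ^^^ 2 ^ i < m := by
  have hbit : ∀ j, (m ^^^ 2 ^ i).testBit j = if i = j then false else m.testBit j := by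
    intro j
    rw [Nat.testBit_xor, Nat.testBit_two_pow]
    by_cases hj : i = j
    · subst hj; simp [h]
    · simp [hj]
  have h1 : (m ^^^ 2 ^ i).testBit i = false := by rw [hbit]; simp
  refine ⟨h1, ?_, ?_⟩
  · apply Nat.eq_of_testBit_eq; intro j
    rw [testBit_or_two_pow, hbit]
    by_cases hj : i = j
    · subst hj; simp [h]
    · simp [hj]
  · refine Nat.lt_of_testBit i h1 h ?_
    intro j hj
    rw [hbit]
    simp [Nat.ne_of_lt hj]

theorem or_lt_two_pow' (m n i : Nat) (hm : m < 2 ^ n) (hi : i < n) : m ||| 2 ^ i < 2 ^ n :=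
  Nat.or_lt_two_pow hm (Nat.pow_lt_pow_right (by norm_num) hi)

theorem spentF_zero (d : List (List Int)) : spentF d 0 = 0 := by
  simp [spentF, Nat.zero_testBit]

theorem spentF_or (d : List (List Int)) (m i : Nat) (hi : i < d.length)
    (hb : m.testBit i = false) :
    spentF d (m ||| 2 ^ i) = spentF d m + costF d i := by
  unfold spentF
  have : ∀ j ∈ Finset.range d.length,
      (if (m ||| 2 ^ i).testBit j then costF d j else 0) =
      (if m.testBit j then costF d j else 0) + (if j = i then costF d j else 0) := by
    intro j _
    rw [testBit_or_two_pow]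
    by_cases hj : i = j
    · subst hj; simp [hb]
    · simp [hj, Ne.symm hj]
  rw [Finset.sum_congr rfl this, Finset.sum_add_distrib]
  congr 1
  rw [Finset.sum_ite_eq' (Finset.range d.length) i (fun j => costF d j)]
  simp [hi]

theorem sum_map_range (f : Nat → Int) (n : Nat) :
    ((List.range n).map f).sum = ∑ i ∈ Finset.range n, f i := by
  induction n with
  | zero => simp
  | succ n ih => rw [List.range_succ, Finset.sum_range_succ, List.map_append, List.sum_append, ih]; simp

theorem foldl_max_le_int {β : Type} (l : List β) (f : β → Int) :
    ∀ (init c : Int), init ≤ c → (∀ x ∈ l, f x ≤ c) →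
      l.foldl (fun acc y => max acc (f y)) init ≤ c := by
  induction l with
  | nil => intro init c h0 _; simpa using h0
  | cons x xs ih =>
    intro init c h0 h
    simp only [List.foldl_cons]
    exact ih _ _ (by have := h x (by simp); omega) (fun y hy => h y (by simp [hy]))

theorem foldl_range'_inv {σ : Type} (f : σ → Nat → σ) (P : Nat → σ → Prop) :
    ∀ (len s : Nat) (st : σ), P s st →
      (∀ m st', s ≤ m → m < s + len → P m st' → P (m + 1) (f st' m)) →
      P (s + len) (List.foldl f st (List.range' s len)) := by
  intro len
  induction len with
  | zero => intro s st h _; simpa using h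
  | succ len ih =>
    intro s st h hstep
    rw [List.range'_succ, List.foldl_cons]
    have := ih (s + 1) (f st s) (hstep s st le_rfl (by omega) h)
      (fun m st' hm hm' hp => hstep m st' (by omega) (by omega) hp)
    rw [show s + (len + 1) = s + 1 + len by omega]
    exact this

theorem getD_map_need (d : List (List Int)) (i : Nat) (h : i < d.length) :
    (d.map (fun x => (PySem.List.pyGet? x 0).getD 0)).getD i 0 = needF d i := by
  simp [needF, List.getD_eq_getElem?_getD, List.getElem?_map, List.getElem?_eq_getElem h,
    PySem.List.pyGet?_natCast]

theorem getD_map_cost (d : List (List Int)) (i : Nat) (h : i < d.length) :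
    (d.map (fun x => (PySem.List.pyGet? x 1).getD 0)).getD i 0 = costF d i := by
  simp [costF, List.getD_eq_getElem?_getD, List.getElem?_map, List.getElem?_eq_getElem h,
    PySem.List.pyGet?_natCast]

theorem if_lt_eq_max (a b : Int) : (if a < b then b else a) = max a b := by omega

-- m is a mask together with A's call state (fuel, hp, stage, discovered-set)
def StateRel (k : Int) (d : List (List Int)) (m fuel : Nat)
    (currHp stage : Int) (disc : PySem.Set Int) : Prop :=
  m < 2 ^ d.length ∧ fuel + pcN m = d.length ∧ currHp = k - spentF d m ∧
  stage = ((pcN m : Nat) : Int) ∧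
  ∀ i : Nat, i < d.length → ((i : Int) ∈ disc ↔ m.testBit i = true)

theorem Reach_lt (k : Int) (d : List (List Int)) :
    ∀ m, Reach k d m → m < 2 ^ d.length := by
  intro m h
  induction h with
  | zero => positivity
  | step m i hi hb hr hc ih => exact or_lt_two_pow' _ _ _ ih hi

theorem StateRel_step (k : Int) (d : List (List Int)) (m fuel : Nat)
    (currHp stage : Int) (disc : PySem.Set Int) (i : Nat)
    (hrel : StateRel k d m (fuel + 1) currHp stage disc)
    (hi : i < d.length) (hb : m.testBit i = false) :
    StateRel k d (m ||| 2 ^ i) fuel (currHp - costF d i) (stage + 1)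
      (PySem.Set.union disc (PySem.Set.ofList [(i : Int)])) := by
  obtain ⟨hlt, hfu, hhp, hst, hmem⟩ := hrel
  refine ⟨or_lt_two_pow' _ _ _ hlt hi, ?_, ?_, ?_, ?_⟩
  · rw [pcN_or i m hb]; omega
  · rw [hhp, spentF_or d m i hi hb]; ring
  · rw [hst, pcN_or i m hb]; push_cast; ring
  · intro j hj
    rw [PySem.Set.mem_union, PySem.Set.mem_ofList, testBit_or_two_pow]
    constructor
    · rintro (hin | hin)
      · simp [(hmem j hj).mp hin]
      · simp only [List.mem_singleton] at hin
        have : i = j := by exact_mod_cast hin.symm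
        simp [this]
    · intro hor
      rcases Bool.or_eq_true_iff.mp hor with hbj | hij
      · exact Or.inl ((hmem j hj).mpr hbj)
      · right
        have : i = j := by simpa using hij
        simp [this]


theorem discover_zero (k : Int) (d : List (List Int)) (n : Nat) (hp st : Int) (disc : PySem.Set Int) :
    discover k d n 0 hp st disc =
    if st ≥ (n : Int) then (n : Int)
    else
      let toDiscover := (List.range n).foldl (fun (acc : List Nat) (i : Nat) =>
        if hp ≥ ((PySem.List.pyGet? ((PySem.List.pyGet? d (i : Int)).getD []) 0).getD 0)
            ∧ ¬ (PySem.Set.contains disc (i : Int) = true) then acc ++ [i] else acc) []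
      if toDiscover = [] then st else -1 := by
  rw [discover]

theorem discover_succ (k : Int) (d : List (List Int)) (n fuel : Nat) (hp st : Int) (disc : PySem.Set Int) :
    discover k d n (fuel + 1) hp st disc =
    if st ≥ (n : Int) then (n : Int)
    else
      if (List.range n).filter
          (fun i => decide (hp ≥ needF d i ∧ ¬ (PySem.Set.contains disc (i : Int) = true))) = [] then st
      else
        ((List.range n).filter
          (fun i => decide (hp ≥ needF d i ∧ ¬ (PySem.Set.contains disc (i : Int) = true)))).foldl
          (fun res i =>
            max res (discover k d n fuel (hp - costF d i) (st + 1)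
              (PySem.Set.union disc (PySem.Set.ofList [(i : Int)])))) (-1) := by
  rw [discover]
  rw [PySem.List.foldl_append_ite_eq_filter
    (fun (i : Nat) => hp ≥ ((PySem.List.pyGet? ((PySem.List.pyGet? d (i : Int)).getD []) 0).getD 0)
      ∧ ¬ (PySem.Set.contains disc (i : Int) = true)) (List.range n) []]
  simp only [List.nil_append, needF, costF]
  refine if_congr Iff.rfl rfl (if_congr Iff.rfl rfl ?_)
  exact PySem.List.foldl_congr_mem _ _ _ _ (fun acc x _ => if_lt_eq_max _ _)

theorem mem_toDiscover (k : Int) (d : List (List Int)) (m : Nat) (hp : Int) (disc : PySem.Set Int)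
    (hmem : ∀ i : Nat, i < d.length → ((i : Int) ∈ disc ↔ m.testBit i = true)) (i : Nat) :
    i ∈ (List.range d.length).filter
        (fun i => decide (hp ≥ needF d i ∧ ¬ (PySem.Set.contains disc (i : Int) = true))) ↔
      i < d.length ∧ hp ≥ needF d i ∧ m.testBit i = false := by
  simp only [List.mem_filter, List.mem_range, decide_eq_true_eq]
  constructor
  · rintro ⟨h1, h2, h3⟩
    refine ⟨h1, h2, ?_⟩
    rw [PySem.Set.contains_iff] at h3
    rw [← Bool.not_eq_true]
    intro hc
    exact h3 ((hmem i h1).mpr hc)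
  · rintro ⟨h1, h2, h3⟩
    refine ⟨h1, h2, ?_⟩
    rw [PySem.Set.contains_iff]
    intro hc
    rw [(hmem i h1).mp hc] at h3
    simp at h3
theorem discover_ge_pc (k : Int) (d : List (List Int)) :
    ∀ (fuel m : Nat) (currHp stage : Int) (disc : PySem.Set Int),
      StateRel k d m fuel currHp stage disc →
      ((pcN m : Nat) : Int) ≤ discover k d d.length fuel currHp stage disc := by
  intro fuel
  induction fuel with
  | zero =>
    intro m hp st disc hrel
    obtain ⟨hlt, hfu, hhp, hst, hmem⟩ := hrel
    have hpc : pcN m = d.length := by omega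
    rw [discover_zero, if_pos (by rw [hst, hpc])]
    exact_mod_cast le_of_eq hpc
  | succ fuel ih =>
    intro m hp st disc hrel
    obtain ⟨hlt, hfu, hhp, hst, hmem⟩ := hrel
    rw [discover_succ]
    by_cases hge : st ≥ (d.length : Int)
    · rw [if_pos hge]
      exact_mod_cast pcN_le d.length m hlt
    · rw [if_neg hge]
      by_cases hempty : (List.range d.length).filter
          (fun i => decide (hp ≥ needF d i ∧ ¬ (PySem.Set.contains disc (i : Int) = true))) = []
      · rw [if_pos hempty, hst]
      · rw [if_neg hempty]
        obtain ⟨i0, hi0⟩ := List.exists_mem_of_ne_nil _ hempty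
        obtain ⟨hi0n, hi0hp, hi0b⟩ := (mem_toDiscover k d m hp disc hmem i0).mp hi0
        have hrel' := StateRel_step k d m fuel hp st disc i0 ⟨hlt, hfu, hhp, hst, hmem⟩ hi0n hi0b
        have hih := ih (m ||| 2 ^ i0) (hp - costF d i0) (st + 1)
          (PySem.Set.union disc (PySem.Set.ofList [(i0 : Int)])) hrel'
        have hbr := (PySem.List.le_foldl_max_int _
          (fun i => discover k d d.length fuel (hp - costF d i) (st + 1)
            (PySem.Set.union disc (PySem.Set.ofList [(i : Int)]))) (-1)).2 i0 hi0
        have hpc : pcN (m ||| 2 ^ i0) = pcN m + 1 := pcN_or i0 m hi0b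
        have : ((pcN m : Nat) : Int) ≤ ((pcN (m ||| 2 ^ i0) : Nat) : Int) := by
          rw [hpc]; push_cast; omega
        exact le_trans this (le_trans hih hbr)

theorem discover_le (k : Int) (d : List (List Int)) (B : Int)
    (hB : ∀ m', Reach k d m' → ((pcN m' : Nat) : Int) ≤ B) :
    ∀ (fuel m : Nat) (currHp stage : Int) (disc : PySem.Set Int),
      StateRel k d m fuel currHp stage disc → Reach k d m →
      discover k d d.length fuel currHp stage disc ≤ B := by
  intro fuel
  induction fuel with
  | zero =>
    intro m hp st disc hrel hr
    obtain ⟨hlt, hfu, hhp, hst, hmem⟩ := hrel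
    have hpc : pcN m = d.length := by omega
    rw [discover_zero, if_pos (by rw [hst, hpc])]
    have := hB m hr
    rw [hpc] at this
    exact this
  | succ fuel ih =>
    intro m hp st disc hrel hr
    obtain ⟨hlt, hfu, hhp, hst, hmem⟩ := hrel
    rw [discover_succ]
    by_cases hge : st ≥ (d.length : Int)
    · rw [if_pos hge]
      have hn : pcN m = d.length := by
        have h1 := pcN_le d.length m hlt
        have h2 : ((pcN m : Nat) : Int) ≥ (d.length : Int) := by rw [← hst]; exact hge
        omega
      have := hB m hr
      rw [hn] at this
      exact this
    · rw [if_neg hge]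
      by_cases hempty : (List.range d.length).filter
          (fun i => decide (hp ≥ needF d i ∧ ¬ (PySem.Set.contains disc (i : Int) = true))) = []
      · rw [if_pos hempty, hst]
        exact hB m hr
      · rw [if_neg hempty]
        apply foldl_max_le_int
        · have h0 := hB 0 (Reach.zero)
          rw [pcN_zero] at h0
          omega
        · intro i hi
          obtain ⟨hin, hihp, hib⟩ := (mem_toDiscover k d m hp disc hmem i).mp hi
          have hrel' := StateRel_step k d m fuel hp st disc i ⟨hlt, hfu, hhp, hst, hmem⟩ hin hib
          have hr' : Reach k d (m ||| 2 ^ i) := by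
            refine Reach.step m i hin hib hr ?_
            rw [hhp] at hihp
            omega
          exact ih (m ||| 2 ^ i) _ _ _ hrel' hr'

theorem discover_chain (k : Int) (d : List (List Int)) :
    ∀ m, Reach k d m →
      ∃ fuel currHp stage disc, StateRel k d m fuel currHp stage disc ∧
        discover k d d.length fuel currHp stage disc ≤
          discover k d d.length d.length k 0 PySem.Set.empty := by
  intro m hr
  induction hr with
  | zero =>
    refine ⟨d.length, k, 0, PySem.Set.empty, ⟨?_, ?_, ?_, ?_, ?_⟩, le_refl _⟩
    · positivity
    · rw [pcN_zero]; omega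
    · rw [spentF_zero]; ring
      
    · rw [pcN_zero]; rfl
    · intro i _
      simp [PySem.Set.empty, Nat.zero_testBit]
  | step m i hi hb hrm hc ih =>
    obtain ⟨fuel, hp, st, disc, hrel, hle⟩ := ih
    obtain ⟨hlt, hfu, hhp, hst, hmem⟩ := hrel
    have hlt' : m ||| 2 ^ i < 2 ^ d.length := or_lt_two_pow' _ _ _ hlt hi
    have hpcm : pcN m + 1 ≤ d.length := by
      have := pcN_le d.length (m ||| 2 ^ i) hlt'
      rw [pcN_or i m hb] at this
      exact this
    obtain ⟨fuel', rfl⟩ : ∃ f, fuel = f + 1 := ⟨fuel - 1, by omega⟩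
    have hrel' := StateRel_step k d m fuel' hp st disc i ⟨hlt, hfu, hhp, hst, hmem⟩ hi hb
    refine ⟨fuel', hp - costF d i, st + 1,
      PySem.Set.union disc (PySem.Set.ofList [(i : Int)]), hrel', le_trans ?_ hle⟩
    rw [discover_succ]
    have hge : ¬ st ≥ (d.length : Int) := by
      rw [hst]
      have : (pcN m : Int) < (d.length : Int) := by exact_mod_cast hpcm
      omega
    rw [if_neg hge]
    have hihp : hp ≥ needF d i := by rw [hhp]; omega
    have hmemtd := (mem_toDiscover k d m hp disc hmem i).mpr ⟨hi, hihp, hb⟩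
    have hempty : ¬ (List.range d.length).filter
        (fun j => decide (hp ≥ needF d j ∧ ¬ (PySem.Set.contains disc (j : Int) = true))) = [] := by
      intro hc'
      rw [hc'] at hmemtd
      simp at hmemtd
    rw [if_neg hempty]
    exact (PySem.List.le_foldl_max_int _
      (fun j => discover k d d.length fuel' (hp - costF d j) (st + 1)
        (PySem.Set.union disc (PySem.Set.ofList [(j : Int)]))) (-1)).2 i hmemtd

-- invariant of B's loop after masks 1..M-1 are processed
def InvB (k : Int) (d : List (List Int)) (M : Nat) (st : List Bool × Int) : Prop :=
  st.1.length = M ∧ (∀ j, j < M → (st.1.getD j false = true ↔ Reach k d j)) ∧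
  (∃ j, j < M ∧ Reach k d j ∧ st.2 = ((pcN j : Nat) : Int)) ∧
  (∀ j, j < M → Reach k d j → ((pcN j : Nat) : Int) ≤ st.2)

theorem getD_append_len (l : List Bool) (b : Bool) :
    (l ++ [b]).getD l.length false = b := by
  rw [List.getD_eq_getElem?_getD, List.getElem?_append_right (le_refl l.length)]
  simp

theorem altStep_inv (k : Int) (d : List (List Int)) (M : Nat) (st : List Bool × Int)
    (h1 : 1 ≤ M) (h2 : M < 2 ^ d.length) (hinv : InvB k d M st) :
    InvB k d (M + 1)
      (altStep k d.length (d.map (fun x => (PySem.List.pyGet? x 0).getD 0))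
        (d.map (fun x => (PySem.List.pyGet? x 1).getD 0)) st M) := by
  obtain ⟨hlen, hreach, ⟨j0, hj0M, hj0r, hj0eq⟩, hmax⟩ := hinv
  have hs : (List.range d.length).foldl (fun acc i =>
      if (M >>> i) &&& 1 == 1 then acc + ((d.map (fun x => (PySem.List.pyGet? x 1).getD 0)).getD i 0)
      else acc) 0 = spentF d M := by
    rw [PySem.List.foldl_congr_mem _ _
      (fun acc i => acc + (if M.testBit i then costF d i else 0)) _ ?_]
    · rw [PySem.List.foldl_add, sum_map_range]
      simp [spentF]
    · intro acc i hi
      rw [bitget_eq_testBit, getD_map_cost d i (List.mem_range.mp hi)]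
      by_cases hb : M.testBit i <;> simp [hb]
  have hok : ((List.range d.length).any (fun i =>
      ((M >>> i) &&& 1 == 1) && st.1.getD (M ^^^ (1 <<< i)) false
        && decide (k - (spentF d M - ((d.map (fun x => (PySem.List.pyGet? x 1).getD 0)).getD i 0))
            ≥ ((d.map (fun x => (PySem.List.pyGet? x 0).getD 0)).getD i 0))) = true)
      ↔ Reach k d M := by
    rw [List.any_eq_true]
    constructor
    · rintro ⟨i, hir, hp⟩
      have hi := List.mem_range.mp hir
      rw [Bool.and_eq_true, Bool.and_eq_true] at hp
      obtain ⟨⟨hbit, hgd⟩, hcond⟩ := hp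
      rw [bitget_eq_testBit] at hbit
      obtain ⟨hf1, hf2, hf3⟩ := xor_two_pow_facts M i hbit
      rw [Nat.one_shiftLeft] at hgd
      have hm0r : Reach k d (M ^^^ 2 ^ i) := (hreach _ (by omega)).mp hgd
      rw [decide_eq_true_eq, getD_map_cost d i hi, getD_map_need d i hi] at hcond
      have hsp : spentF d M = spentF d (M ^^^ 2 ^ i) + costF d i := by
        conv_lhs => rw [← hf2]
        exact spentF_or d _ i hi hf1
      have := Reach.step (M ^^^ 2 ^ i) i hi hf1 hm0r (by omega)
      rwa [hf2] at this
    · intro hr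
      cases hr with
      | zero => omega
      | step m i hi hb hrm hc =>
        refine ⟨i, List.mem_range.mpr hi, ?_⟩
        have hbit : (m ||| 2 ^ i).testBit i = true := by
          rw [testBit_or_two_pow]; simp
        obtain ⟨hf1, hf2, hf3⟩ := xor_two_pow_facts (m ||| 2 ^ i) i hbit
        have hxor : (m ||| 2 ^ i) ^^^ 2 ^ i = m := or_xor_cancel m i hb
        rw [Bool.and_eq_true, Bool.and_eq_true]
        refine ⟨⟨by rw [bitget_eq_testBit]; exact hbit, ?_⟩, ?_⟩
        · rw [Nat.one_shiftLeft, hxor]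
          exact (hreach m (by rw [hxor] at hf3; omega)).mpr hrm
        · rw [decide_eq_true_eq, getD_map_cost d i hi, getD_map_need d i hi]
          have hsp : spentF d (m ||| 2 ^ i) = spentF d m + costF d i := spentF_or d m i hi hb
          omega
  simp only [altStep, hs]
  generalize hOK : ((List.range d.length).any (fun i =>
      ((M >>> i) &&& 1 == 1) && st.1.getD (M ^^^ (1 <<< i)) false
        && decide (k - (spentF d M - ((d.map (fun x => (PySem.List.pyGet? x 1).getD 0)).getD i 0))
            ≥ ((d.map (fun x => (PySem.List.pyGet? x 0).getD 0)).getD i 0)))) = okv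
  rw [hOK] at hok
  refine ⟨by simp [hlen], ?_, ?_, ?_⟩
  · intro j hj
    rcases Nat.lt_or_ge j M with hjM | hjM
    · rw [List.getD_append _ _ _ j (by omega)]
      exact hreach j hjM
    · have hjeq : j = M := by omega
      subst hjeq
      have hG : (st.1 ++ [okv]).getD j false = okv := by
        conv_lhs => rw [← hlen]
        exact getD_append_len _ _
      rw [hG]
      exact hok
  · cases okv with
    | false => exact ⟨j0, by omega, hj0r, by simpa using hj0eq⟩
    | true =>
      by_cases hgt : ((PySem.Int.bitCount (M : Int) : Nat) : Int) > st.2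
      · exact ⟨M, by omega, hok.mp rfl, by simp [hgt, pcN]⟩
      · refine ⟨j0, by omega, hj0r, ?_⟩
        simp only [hgt]
        simpa using hj0eq
  · intro j hj hr
    rcases Nat.lt_or_ge j M with hjM | hjM
    · have hold := hmax j hjM hr
      cases okv with
      | false => simpa using hold
      | true =>
        by_cases hgt : ((PySem.Int.bitCount (M : Int) : Nat) : Int) > st.2 <;>
          simp [hgt] <;> omega
    · have hjeq : j = M := by omega
      subst hjeq
      have hoktrue : okv = true := hok.mpr hr
      subst hoktrue
      by_cases hgt : ((PySem.Int.bitCount (j : Int) : Nat) : Int) > st.2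
      · simp [hgt, pcN]
      · simp [hgt, pcN]
        omega

theorem solution_eq (k : Int) (d : List (List Int)) : solution k d = solution_alt k d := by
  have hpow : 1 ≤ 2 ^ d.length := Nat.one_le_two_pow
  have hrange : (List.range (2 ^ d.length)).drop 1 = List.range' 1 (2 ^ d.length - 1) := by
    rw [List.range_eq_range']
    obtain ⟨t, ht⟩ : ∃ t, 2 ^ d.length = t + 1 := ⟨2 ^ d.length - 1, by omega⟩
    rw [ht, List.range'_succ]
    simp
  have hbase : InvB k d 1 ([true], 0) := by
    refine ⟨rfl, ?_, ⟨0, by omega, Reach.zero, by rw [pcN_zero]; rfl⟩, ?_⟩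
    · intro j hj
      interval_cases j
      simp only [List.getD]
      constructor
      · intro _; exact Reach.zero
      · intro _; rfl
    · intro j hj _
      interval_cases j
      rw [pcN_zero]
      simp
  have hinv : InvB k d (2 ^ d.length)
      ((List.range' 1 (2 ^ d.length - 1)).foldl
        (altStep k d.length (d.map (fun x => (PySem.List.pyGet? x 0).getD 0))
          (d.map (fun x => (PySem.List.pyGet? x 1).getD 0))) ([true], 0)) := by
    have := foldl_range'_inv
      (altStep k d.length (d.map (fun x => (PySem.List.pyGet? x 0).getD 0))
        (d.map (fun x => (PySem.List.pyGet? x 1).getD 0)))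
      (InvB k d) (2 ^ d.length - 1) 1 ([true], 0) hbase
      (fun m st' h1m hm2 hp => altStep_inv k d m st' h1m (by omega) hp)
    rwa [show 1 + (2 ^ d.length - 1) = 2 ^ d.length by omega] at this
  obtain ⟨hlen, hreach, ⟨j0, hj0M, hj0r, hj0eq⟩, hmax⟩ := hinv
  have hrel0 : StateRel k d 0 d.length k 0 PySem.Set.empty := by
    refine ⟨by positivity, by rw [pcN_zero]; omega, by rw [spentF_zero]; ring,
      by rw [pcN_zero]; rfl, ?_⟩
    intro i _
    simp [PySem.Set.empty, Nat.zero_testBit]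
  have hle := discover_le k d _
    (fun m' hr => hmax m' (Reach_lt k d m' hr) hr)
    d.length 0 k 0 PySem.Set.empty hrel0 Reach.zero
  have hge : ((List.range' 1 (2 ^ d.length - 1)).foldl
      (altStep k d.length (d.map (fun x => (PySem.List.pyGet? x 0).getD 0))
        (d.map (fun x => (PySem.List.pyGet? x 1).getD 0))) ([true], 0)).2 ≤
      discover k d d.length d.length k 0 PySem.Set.empty := by
    obtain ⟨fuel, hp, st, disc, hrel, hchain⟩ := discover_chain k d j0 hj0r
    have hg := discover_ge_pc k d fuel j0 hp st disc hrel
    rw [hj0eq]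
    exact le_trans hg hchain
  simp only [solution, solution_alt, hrange]
  exact le_antisymm hle hge

-- ===== VERDICT (by name: the statement is the Claim_ definition above) =====
theorem solution_spec : Claim_equal_solution := by
  intro k d _ _
  unfold Spec_solution
  exact solution_eq k d
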